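-- pv_equiv track=rewrite | github.com/bychanlee/rubato-skills | skills/psi-run-calc/run_calc.py | _ordered_metadata
-- ===== SOURCE A (Python) =====
-- from typing import Any
--
-- CALC_KEY_ORDER = [
--     "id", "title", "date", "status", "code", "computer", "tags",
--     "parents", "children", "reports", "hpc_path", "job_id", "key_results", "notes",
-- ]
--
-- def _ordered_metadata(metadata: dict) -> list[tuple[str, Any]]:
--     ordered = []
--     for k in CALC_KEY_ORDER:
--         if k in metadata:
--             ordered.append((k, metadata[k]))
--     for k in metadata:
--         if k not in CALC_KEY_ORDER:
--             ordered.append((k, metadata[k]))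
--     return ordered
-- ===== SOURCE B (Python) =====
-- from typing import Any
--
-- CALC_KEY_ORDER = [
--     "id", "title", "date", "status", "code", "computer", "tags",
--     "parents", "children", "reports", "hpc_path", "job_id", "key_results", "notes",
-- ]
--
-- def _ordered_metadata(metadata: dict) -> list[tuple[str, Any]]:
--     n = len(CALC_KEY_ORDER)
--
--     def rank(kv):
--         return CALC_KEY_ORDER.index(kv[0]) if kv[0] in CALC_KEY_ORDER else n
--
--     return sorted(metadata.items(), key=rank)
-- ===== Notes on version B (the rewrite author's own statement) =====
-- stated objective: idiomatic
-- what changed: Replaces A's two explicit loops (scan of CALC_KEY_ORDER then scan of the dict) by a single stable sort of metadata.items() keyed by the key's rank in CALC_KEY_ORDER (sentinel len(CALC_KEY_ORDER) for unknown keys), stability keeping unknown keys in insertion order.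
import Mathlib
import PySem

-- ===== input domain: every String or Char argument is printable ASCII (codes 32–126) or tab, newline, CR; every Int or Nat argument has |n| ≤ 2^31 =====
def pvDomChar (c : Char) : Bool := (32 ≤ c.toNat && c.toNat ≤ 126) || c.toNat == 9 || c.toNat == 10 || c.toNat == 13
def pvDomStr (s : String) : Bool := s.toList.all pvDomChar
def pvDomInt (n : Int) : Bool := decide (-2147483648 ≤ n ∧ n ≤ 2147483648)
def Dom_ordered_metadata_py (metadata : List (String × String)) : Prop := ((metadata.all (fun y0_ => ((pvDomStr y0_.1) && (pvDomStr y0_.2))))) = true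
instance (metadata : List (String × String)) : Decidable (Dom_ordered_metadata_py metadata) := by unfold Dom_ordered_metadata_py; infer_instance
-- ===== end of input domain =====

-- B replaces A's two explicit loops by a single stable sort of the items keyed by the key's
-- rank in CALC_KEY_ORDER (sentinel = its length for unknown keys); objective: idiomatic.


-- ===== PORT A =====
-- CALC_KEY_ORDER
def calcKeyOrder : List String :=
  ["id", "title", "date", "status", "code", "computer", "tags",
   "parents", "children", "reports", "hpc_path", "job_id", "key_results", "notes"]

-- Literal port of A: first loop over CALC_KEY_ORDER collecting present keys, then a loop over
-- the dict's keys collecting the non-priority ones.  'metadata[k]' is guarded by membership in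
-- both loops, so the total 'getD … ""' is exact there.
def ordered_metadata_py (metadata : List (String × String)) : List (String × String) :=
  let d := PySem.Dict.mk metadata
  let ordered := calcKeyOrder.foldl
    (fun acc k => if d.contains k then acc ++ [(k, d.getD k "")] else acc) []
  d.keys.foldl
    (fun acc k => if !(calcKeyOrder.contains k) then acc ++ [(k, d.getD k "")] else acc) ordered

-- ===== PORT B =====
-- B's helper 'rank(kv)': CALC_KEY_ORDER.index(kv[0]) if kv[0] in CALC_KEY_ORDER else n.
-- 'index' is guarded by the membership test, so the total '.getD 0' is exact there.
def rank_py (kv : String × String) : Int :=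
  if calcKeyOrder.contains kv.1
  then (((PySem.List.index? calcKeyOrder kv.1).getD 0 : Nat) : Int)
  else PySem.List.len calcKeyOrder

def ordered_metadata_py_alt (metadata : List (String × String)) : List (String × String) :=
  PySem.List.sorted metadata rank_py false

-- ===== PRECONDITION & SPEC =====
-- Pre_ excludes association lists with duplicate keys: a Python dict can never hold them, so
-- the list-level behaviour of either program there is an artefact of the representation.
def Pre_ordered_metadata_py (metadata : List (String × String)) : Prop :=
  (metadata.map Prod.fst).Nodup
instance (metadata : List (String × String)) : Decidable (Pre_ordered_metadata_py metadata) := by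
  unfold Pre_ordered_metadata_py; infer_instance

def pvWitness_ordered_metadata_py : (List (String × String)) :=
  [("zz", "9"), ("id", "1"), ("title", "t")]

def Spec_ordered_metadata_py (metadata : List (String × String)) (out : List (String × String)) : Prop :=
  out = ordered_metadata_py_alt metadata
instance (metadata : List (String × String)) (out : List (String × String)) : Decidable (Spec_ordered_metadata_py metadata out) := by
  unfold Spec_ordered_metadata_py; infer_instance

-- ===== CLAIM (what is proved, stated in full; the proofs are below) =====
def Claim_equal_ordered_metadata_py : Prop :=
  ∀ (metadata : List (String × String)), Dom_ordered_metadata_py metadata →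
    Pre_ordered_metadata_py metadata →
    Spec_ordered_metadata_py metadata (ordered_metadata_py metadata)

-- ===== LEMMAS AND PROOFS =====

-- `idxOf?` of a member is `some` of its `idxOf`.
theorem idxOf?_mem (l : List String) (a : String) (h : a ∈ l) :
    List.idxOf? a l = some (List.idxOf a l) := by
  induction l with
  | nil => simp at h
  | cons x l ih =>
    by_cases hx : x = a
    · simp [List.idxOf?_cons, hx]
    · have : a ∈ l := by simpa [hx, Ne.symm hx] using h
      simp [List.idxOf?_cons, hx, ih this, beq_iff_eq]

-- `idxOf?` of the n-th element of a duplicate-free list is n.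
theorem idxOf?_getElem (l : List String) (h : l.Nodup) (n : Nat) (hn : n < l.length) :
    List.idxOf? l[n] l = some n := by
  rw [idxOf?_mem _ _ (l.getElem_mem hn), List.Nodup.idxOf_getElem h n hn]

-- rank_py is bounded by 0..14.
theorem rank_bounds (a : String × String) : 0 ≤ rank_py a ∧ rank_py a ≤ 14 := by
  unfold rank_py
  by_cases h : calcKeyOrder.contains a.1
  · have hm : a.1 ∈ calcKeyOrder := by simpa using h
    have hlt : List.idxOf a.1 calcKeyOrder < 14 := by
      have := List.idxOf_lt_length_iff.mpr hm
      simpa [calcKeyOrder] using this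
    rw [if_pos h, PySem.List.index?, idxOf?_mem _ _ hm]
    simp
    omega
  · rw [if_neg h]
    simp [PySem.List.len, calcKeyOrder]

-- rank_py equals a literal rank r iff the key is the r-th priority key.
theorem rank_eq_iff (a : String × String) (r : Nat) (k : String)
    (hr : List.idxOf? k calcKeyOrder = some r) :
    (rank_py a = (r : Int)) ↔ a.1 = k := by
  obtain ⟨hrl, hk, -⟩ := List.idxOf?_eq_some_iff.mp hr
  constructor
  · intro h
    unfold rank_py at h
    by_cases hc : calcKeyOrder.contains a.1
    · rw [if_pos hc] at h
      have hm : a.1 ∈ calcKeyOrder := by simpa using hc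
      rw [PySem.List.index?, idxOf?_mem _ _ hm] at h
      simp at h
      have hidx : List.idxOf a.1 calcKeyOrder = r := by exact_mod_cast h
      have hlen : List.idxOf a.1 calcKeyOrder < calcKeyOrder.length := by
        rw [hidx]; exact hrl
      have := List.getElem_idxOf hlen
      rw [← this]
      simp [hidx, hk]
    · rw [if_neg hc] at h
      have h15 : r < 14 := by simpa [calcKeyOrder] using hrl
      simp [PySem.List.len, calcKeyOrder] at h
      omega
  · intro h
    have hm : a.1 ∈ calcKeyOrder := by rw [h, ← hk]; exact calcKeyOrder.getElem_mem hrl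
    have hc : calcKeyOrder.contains a.1 = true := by simpa using hm
    unfold rank_py
    rw [if_pos hc, PySem.List.index?, idxOf?_mem _ _ hm]
    have : List.idxOf? a.1 calcKeyOrder = some r := by rw [h]; exact hr
    rw [idxOf?_mem _ _ hm] at this
    simp at this ⊢
    omega

-- rank_py = 14 iff the key is not a priority key.
theorem rank_eq_14_iff (a : String × String) :
    (rank_py a = 14) ↔ calcKeyOrder.contains a.1 = false := by
  constructor
  · intro h
    by_cases hc : calcKeyOrder.contains a.1
    · exfalso
      have hm : a.1 ∈ calcKeyOrder := by simpa using hc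
      have hlt : List.idxOf a.1 calcKeyOrder < 14 := by
        have := List.idxOf_lt_length_iff.mpr hm
        simpa [calcKeyOrder] using this
      unfold rank_py at h
      rw [if_pos hc, PySem.List.index?, idxOf?_mem _ _ hm] at h
      simp at h
      omega
    · simpa using hc
  · intro h
    unfold rank_py
    rw [if_neg (by simpa using h)]
    simp [PySem.List.len, calcKeyOrder]

-- Filters by rank r and by the key naming rank r agree.
theorem filter_rank_eq (m : List (String × String)) (r : Nat) (k : String)
    (h : List.idxOf? k calcKeyOrder = some r) :
    m.filter (fun a => rank_py a = (r : Int)) = m.filter (fun a => a.1 == k) := by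
  apply List.filter_congr
  intro a _
  rw [Bool.eq_iff_iff]
  simp [rank_eq_iff a r k h]

-- Inserting behind everything `before x` rejects, in front of everything it accepts.
theorem insertBy_split (before : (String × String) → (String × String) → Bool)
    (x : String × String) (L1 L2 : List (String × String))
    (h1 : ∀ y ∈ L1, before x y = false) (h2 : ∀ y ∈ L2, before x y = true) :
    PySem.List.insertBy before x (L1 ++ L2) = L1 ++ x :: L2 := by
  induction L1 with
  | nil =>
    cases L2 with
    | nil => simp [PySem.List.insertBy]
    | cons y ys => simp [PySem.List.insertBy, h2 y (by simp)]
  | cons a L1 ih =>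
    simp only [List.cons_append, PySem.List.insertBy, h1 a (by simp)]
    simp only [Bool.false_eq_true]
    exact congrArg (a :: ·) (ih (fun y hy => h1 y (by simp [hy])))

-- flatMap respects pointwise equality on members.
theorem flatMap_congr' (l : List Nat) (f g : Nat → List (String × String))
    (h : ∀ a ∈ l, f a = g a) : l.flatMap f = l.flatMap g := by
  induction l with
  | nil => simp
  | cons a l ih =>
    simp only [List.flatMap_cons, h a (by simp), ih (fun b hb => h b (by simp [hb]))]

-- The stable sort groups the list into rank buckets 0..14, each bucket in original order.
theorem sorted_flat (xs : List (String × String)) :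
    PySem.List.sorted xs rank_py false
      = (List.range 15).flatMap (fun (r : Nat) => xs.filter (fun a => rank_py a = (r : Int))) := by
  induction xs using List.reverseRecOn with
  | nil => simp [PySem.List.sorted]
  | append_singleton xs x ih =>
    have hstep : PySem.List.sorted (xs ++ [x]) rank_py false
        = PySem.List.insertBy (fun a b => decide (rank_py a < rank_py b)) x
            (PySem.List.sorted xs rank_py false) := by
      simp [PySem.List.sorted, List.foldl_append]
    obtain ⟨hx0, hx14⟩ := rank_bounds x
    have hxr : rank_py x = ((rank_py x).toNat : Int) := (Int.toNat_of_nonneg hx0).symm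
    set r : Nat := (rank_py x).toNat with hrdef
    have hr14 : r ≤ 14 := by omega
    have hsplit : List.range 15 = List.range (r + 1) ++ List.range' (r + 1) (14 - r) := by
      rw [List.range_eq_range', List.range_eq_range',
        show (15 : Nat) = (r + 1) + (14 - r) from by omega, ← List.range'_append]
      norm_num
    have hbump : ∀ r' : Nat, (xs ++ [x]).filter (fun a => rank_py a = (r' : Int))
        = xs.filter (fun a => rank_py a = (r' : Int)) ++ (if r = r' then [x] else []) := by
      intro r'
      rw [List.filter_append]
      congr 1
      by_cases h : r = r'
      · subst h
        simp [← hxr]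
      · have : ¬ (rank_py x = (r' : Int)) := by
          rw [hxr]; intro hc; exact h (by exact_mod_cast hc)
        simp [this, h]
    have hlow : ∀ n : Nat, n ≤ r →
        (List.range n).flatMap (fun (r' : Nat) => (xs ++ [x]).filter (fun a => rank_py a = (r' : Int)))
          = (List.range n).flatMap (fun (r' : Nat) => xs.filter (fun a => rank_py a = (r' : Int))) := by
      intro n hn
      apply flatMap_congr'
      intro r' hr'
      have : r ≠ r' := by have := List.mem_range.mp hr'; omega
      rw [hbump r', if_neg this, List.append_nil]
    have hhigh :
        (List.range' (r + 1) (14 - r)).flatMap (fun (r' : Nat) => (xs ++ [x]).filter (fun a => rank_py a = (r' : Int)))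
          = (List.range' (r + 1) (14 - r)).flatMap (fun (r' : Nat) => xs.filter (fun a => rank_py a = (r' : Int))) := by
      apply flatMap_congr'
      intro r' hr'
      have : r ≠ r' := by obtain ⟨i, -, hi⟩ := List.mem_range'.mp hr'; omega
      rw [hbump r', if_neg this, List.append_nil]
    rw [hstep, ih, hsplit, List.flatMap_append, List.flatMap_append]
    rw [insertBy_split _ x _ _
      (by
        intro y hy
        obtain ⟨r', hr', hyf⟩ := List.mem_flatMap.mp hy
        have hy' : rank_py y = (r' : Int) := by
          have := (List.mem_filter.mp hyf).2
          simpa using this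
        have hle : r' < r + 1 := List.mem_range.mp hr'
        simp only [decide_eq_false_iff_not, not_lt, hxr, hy']
        exact_mod_cast (by omega : r' ≤ r))
      (by
        intro y hy
        obtain ⟨r', hr', hyf⟩ := List.mem_flatMap.mp hy
        have hy' : rank_py y = (r' : Int) := by
          have := (List.mem_filter.mp hyf).2
          simpa using this
        obtain ⟨i, -, hi⟩ := List.mem_range'.mp hr'
        simp only [decide_eq_true_eq, hxr, hy']
        exact_mod_cast (by omega : r < r'))]
    rw [hhigh]
    have hfront :
        (List.range (r + 1)).flatMap (fun (r' : Nat) => (xs ++ [x]).filter (fun a => rank_py a = (r' : Int)))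
          = (List.range (r + 1)).flatMap (fun (r' : Nat) => xs.filter (fun a => rank_py a = (r' : Int))) ++ [x] := by
      rw [List.range_succ, List.flatMap_append, List.flatMap_append, hlow r le_rfl]
      simp only [List.flatMap_cons, List.flatMap_nil, List.append_nil]
      rw [hbump r, if_pos rfl, List.append_assoc]
    rw [hfront]
    simp

-- A's output, reshaped by the loop-shape lemma.
theorem A_eq (m : List (String × String)) :
    ordered_metadata_py m
      = (calcKeyOrder.filter (fun k => (PySem.Dict.mk m).contains k)).map
          (fun k => (k, (PySem.Dict.mk m).getD k ""))
        ++ ((PySem.Dict.mk m).keys.filter (fun k => !(calcKeyOrder.contains k))).map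
          (fun k => (k, (PySem.Dict.mk m).getD k "")) := by
  unfold ordered_metadata_py
  rw [PySem.List.foldl_append_if, PySem.List.foldl_append_if]
  simp only [List.nil_append]

-- With distinct keys, filtering the pairs with key k is the singleton found by lookup.
theorem filter_key (m : List (String × String)) (hN : (m.map Prod.fst).Nodup) (k : String) :
    m.filter (fun a => a.1 == k)
      = (if (PySem.Dict.mk m).contains k
         then [(k, (PySem.Dict.mk m).getD k "")] else []) := by
  induction m with
  | nil => simp [PySem.Dict.contains]
  | cons a m ih =>
    have hN' : (m.map Prod.fst).Nodup := (List.nodup_cons.mp (by simpa using hN)).2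
    have ha : a.1 ∉ m.map Prod.fst := (List.nodup_cons.mp (by simpa using hN)).1
    by_cases hk : a.1 = k
    · have htail : m.filter (fun b => b.1 == k) = [] := by
        rw [List.filter_eq_nil_iff]
        intro b hb
        simp only [beq_iff_eq]
        intro hbk
        exact ha (by rw [hk, ← hbk]; exact List.mem_map_of_mem hb)
      have hcont : (PySem.Dict.mk (a :: m)).contains k = true := by
        simp [PySem.Dict.contains, hk]
      rw [if_pos hcont]
      have hbeq : (a.1 == k) = true := by simp [hk]
      have hget : (PySem.Dict.mk (a :: m)).getD k "" = a.2 := by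
        simp [PySem.Dict.getD, PySem.Dict.get?, hbeq]
      rw [hget]
      rw [List.filter_cons_of_pos (by simp [hk]), htail]
      rw [show a = (k, a.2) from by rw [← hk]]
    · rw [List.filter_cons_of_neg (by simp [hk])]
      rw [ih hN']
      have hcont : (PySem.Dict.mk (a :: m)).contains k = (PySem.Dict.mk m).contains k := by
        simp [PySem.Dict.contains, hk]
      have hbeq : (a.1 == k) = false := by simp [hk]
      have hget : (PySem.Dict.mk (a :: m)).getD k "" = (PySem.Dict.mk m).getD k "" := by
        simp [PySem.Dict.getD, PySem.Dict.get?, hbeq]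
      rw [hcont, hget]

-- With distinct keys, the second loop over the keys re-collects the pairs themselves.
theorem keys_loop (m : List (String × String)) (hN : (m.map Prod.fst).Nodup)
    (p : String → Bool) :
    ((m.map Prod.fst).filter p).map (fun k => (k, (PySem.Dict.mk m).getD k ""))
      = m.filter (fun a => p a.1) := by
  induction m with
  | nil => simp
  | cons a m ih =>
    have hN' : (m.map Prod.fst).Nodup := (List.nodup_cons.mp (by simpa using hN)).2
    have ha : a.1 ∉ m.map Prod.fst := (List.nodup_cons.mp (by simpa using hN)).1
    have hget : ∀ k' ∈ (m.map Prod.fst).filter p,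
        (PySem.Dict.mk (a :: m)).getD k' "" = (PySem.Dict.mk m).getD k' "" := by
      intro k' hk'
      have hk'm : k' ∈ m.map Prod.fst := (List.mem_filter.mp hk').1
      have : a.1 ≠ k' := fun h => ha (h ▸ hk'm)
      simp [PySem.Dict.getD, PySem.Dict.get?, this]
    by_cases hp : p a.1
    · rw [List.map_cons, List.filter_cons_of_pos (by simp [hp])]
      rw [List.filter_cons_of_pos (by simp [hp]), List.map_cons]
      congr 1
      · simp [PySem.Dict.getD, PySem.Dict.get?]
      · rw [List.map_congr_left (g := fun k => (k, (PySem.Dict.mk m).getD k ""))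
            (fun k' hk' => by rw [hget k' hk'])]
        exact ih hN'
    · rw [List.map_cons, List.filter_cons_of_neg (by simp [hp])]
      rw [List.filter_cons_of_neg (by simp [hp])]
      rw [List.map_congr_left (g := fun k => (k, (PySem.Dict.mk m).getD k ""))
          (fun k' hk' => by rw [hget k' hk'])]
      exact ih hN'

-- A list-valued if is a flatMap-filter-map bridge.
theorem map_filter_eq_flatMap (P : List String) (p : String → Bool)
    (f : String → String × String) :
    (P.filter p).map f = P.flatMap (fun k => if p k then [f k] else []) := by
  induction P with
  | nil => simp
  | cons a P ih => by_cases h : p a <;> simp [h, ih]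

-- Buckets 0..n-1 are the filters by the first n priority keys.
theorem range_flat (m : List (String × String)) (n : Nat) (hn : n ≤ 14) :
    (List.range n).flatMap (fun (r : Nat) => m.filter (fun a => rank_py a = (r : Int)))
      = (calcKeyOrder.take n).flatMap (fun k => m.filter (fun a => a.1 == k)) := by
  induction n with
  | zero => simp
  | succ n ih =>
    have hlt : n < calcKeyOrder.length := by simp [calcKeyOrder]; omega
    rw [List.range_succ, List.flatMap_append, ih (by omega)]
    rw [List.take_add_one, List.flatMap_append]
    congr 1
    rw [List.getElem?_eq_getElem hlt]
    simp only [Option.toList_some, List.flatMap_cons, List.flatMap_nil, List.append_nil]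
    exact filter_rank_eq m n _ (idxOf?_getElem _ (by decide) n hlt)

-- A = B on duplicate-free key lists.
theorem main_eq (m : List (String × String)) (hN : (m.map Prod.fst).Nodup) :
    ordered_metadata_py m = ordered_metadata_py_alt m := by
  rw [A_eq]
  unfold ordered_metadata_py_alt
  rw [sorted_flat]
  rw [show (15 : Nat) = 14 + 1 from rfl, List.range_succ, List.flatMap_append]
  congr 1
  · rw [range_flat m 14 le_rfl]
    rw [show calcKeyOrder.take 14 = calcKeyOrder from rfl]
    rw [map_filter_eq_flatMap]
    exact congrArg calcKeyOrder.flatMap (funext fun k => (filter_key m hN k).symm)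
  · simp only [List.flatMap_cons, List.flatMap_nil, List.append_nil]
    rw [PySem.Dict.keys_mk, keys_loop m hN]
    apply List.filter_congr
    intro a _
    rw [Bool.eq_iff_iff]
    simp [rank_eq_14_iff a]

-- ===== VERDICT (by name: the statement is the Claim_ definition above) =====
theorem ordered_metadata_py_spec : Claim_equal_ordered_metadata_py := by
  intro m _ hPre
  unfold Spec_ordered_metadata_py
  exact main_eq m hPre
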